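-- pv_equiv track=rewrite | github.com/FabioFlorencio/curso-de-python | python_basico/funcao/aula_107_1.py | calc_sentimentos
-- ===== SOURCE A (Python) =====
-- def calc_sentimentos(comentarios):
--     cont_sent_neg = 0
--     cont_sent_pos = 0
--
--     for comentario in comentarios:
--         if comentario['Sentimento'] == 'Positivo':
--             cont_sent_neg+= 1
--         else:
--             cont_sent_pos+= 1
--
--     return cont_sent_neg, cont_sent_pos
-- ===== SOURCE B (Python) =====
-- def calc_sentimentos(comentarios):
--     # Group by sentiment first (a frequency dict), then read off the counts.
--     freq = {}
--     for comentario in comentarios: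
--         s = comentario['Sentimento']
--         freq[s] = freq.get(s, 0) + 1
--     pos = freq.get('Positivo', 0)
--     others = 0
--     for k, v in freq.items():
--         if k != 'Positivo':
--             others += v
--     return pos, others
-- ===== Notes on version B (the rewrite author's own statement) =====
-- stated objective: alternative
-- what changed: Instead of A's two-counter if/else loop, B groups the comments into a sentiment-frequency dictionary in one stage and then derives the pair from the dictionary: the 'Positivo' entry and the sum of all other entries.
import Mathlib
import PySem

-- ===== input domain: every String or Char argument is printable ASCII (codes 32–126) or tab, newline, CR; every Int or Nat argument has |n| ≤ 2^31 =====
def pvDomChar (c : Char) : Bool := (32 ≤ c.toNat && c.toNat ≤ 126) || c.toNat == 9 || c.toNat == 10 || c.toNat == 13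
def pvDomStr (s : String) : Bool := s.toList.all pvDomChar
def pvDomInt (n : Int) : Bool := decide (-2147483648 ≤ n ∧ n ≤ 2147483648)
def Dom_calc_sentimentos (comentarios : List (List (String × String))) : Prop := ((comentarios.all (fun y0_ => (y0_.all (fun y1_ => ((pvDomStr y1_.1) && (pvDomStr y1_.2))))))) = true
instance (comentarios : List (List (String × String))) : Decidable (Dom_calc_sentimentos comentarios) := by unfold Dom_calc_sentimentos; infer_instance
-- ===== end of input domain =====

-- B replaces A's two-counter if/else loop by a grouping stage (a sentiment-frequency dict)
-- followed by reading the 'Positivo' entry and summing the remaining entries (objective: alternative).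

-- ===== PORT A =====
-- A: two counters incremented in an if/else over the comments (A's counter NAMES are swapped,
-- but the returned pair is (positives, others)).
def calc_sentimentos (comentarios : List (List (String × String))) : Int × Int :=
  comentarios.foldl
    (fun st c =>
      if (PySem.Dict.mk c).getD "Sentimento" "" == "Positivo" then (st.1 + 1, st.2)
      else (st.1, st.2 + 1))
    (0, 0)

-- ===== PORT B =====
-- B: build freq, a sentiment → count dict; then pos = freq.get('Positivo', 0) and
-- others = sum of the values of the other entries.
def calc_sentimentos_alt (comentarios : List (List (String × String))) : Int × Int :=
  let freq : PySem.Dict String Int :=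
    comentarios.foldl
      (fun d c =>
        let s := (PySem.Dict.mk c).getD "Sentimento" ""
        d.insert s (d.getD s 0 + 1))
      PySem.Dict.empty
  let pos : Int := freq.getD "Positivo" 0
  let others : Int :=
    freq.items.foldl (fun acc p => if p.1 ≠ "Positivo" then acc + p.2 else acc) 0
  (pos, others)

-- ===== PRECONDITION & SPEC =====
-- Python A raises KeyError on any comment without the 'Sentimento' key; exactly those inputs are excluded.
def Pre_calc_sentimentos (comentarios : List (List (String × String))) : Prop :=
  comentarios.all (fun c => (PySem.Dict.mk c).contains "Sentimento") = true
instance (comentarios : List (List (String × String))) : Decidable (Pre_calc_sentimentos comentarios) := by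
  unfold Pre_calc_sentimentos; infer_instance
def pvWitness_calc_sentimentos : (List (List (String × String))) := [[("Sentimento", "Positivo")], [("Sentimento", "Negativo")]]
def Spec_calc_sentimentos (comentarios : List (List (String × String))) (out : Int × Int) : Prop := out = calc_sentimentos_alt comentarios
instance (comentarios : List (List (String × String))) (out : Int × Int) : Decidable (Spec_calc_sentimentos comentarios out) := by unfold Spec_calc_sentimentos; infer_instance

-- ===== CLAIM (what is proved, stated in full; the proofs are below) =====
def Claim_equal_calc_sentimentos : Prop := ∀ (comentarios : List (List (String × String))), Dom_calc_sentimentos comentarios → Pre_calc_sentimentos comentarios → Spec_calc_sentimentos comentarios (calc_sentimentos comentarios)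

-- ===== LEMMAS AND PROOFS =====

-- Invariant of A's fold: from accumulator (a, b) it adds the positive count to a and the rest to b
-- (counts phrased over the extracted sentiment list, which is what B's counter is about).
theorem pvA_foldl_inv (l : List (List (String × String))) (a b : Int) :
    l.foldl
      (fun st c =>
        if (PySem.Dict.mk c).getD "Sentimento" "" == "Positivo" then (st.1 + 1, st.2)
        else (st.1, st.2 + 1))
      (a, b)
    = (a + ((l.map (fun c => (PySem.Dict.mk c).getD "Sentimento" "")).count "Positivo" : Nat),
       b + ((l.length : Int)
            - ((l.map (fun c => (PySem.Dict.mk c).getD "Sentimento" "")).count "Positivo" : Nat))) := by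
  induction l generalizing a b with
  | nil => simp
  | cons c rest ih =>
    simp only [List.foldl_cons, List.map_cons, List.count_cons, List.length_cons]
    by_cases h : ((PySem.Dict.mk c).getD "Sentimento" "" == "Positivo") = true
    · rw [if_pos h, ih]
      simp only [h, if_true, Prod.mk.injEq]
      constructor <;> push_cast <;> ring
    · rw [if_neg h, ih]
      simp only [h, Prod.mk.injEq]
      constructor <;> push_cast <;> ring

-- B's grouping loop IS Counter over the extracted sentiments.
theorem pvB_freq_eq_counter (l : List (List (String × String))) :
    (l.foldl (fun d c =>
        let s := (PySem.Dict.mk c).getD "Sentimento" ""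
        d.insert s (d.getD s 0 + 1)) PySem.Dict.empty)
    = PySem.Dict.counter (l.map (fun c => (PySem.Dict.mk c).getD "Sentimento" "")) := by
  rw [← PySem.Dict.foldl_insert_getD_add_one_eq_counter, List.foldl_map]

-- B's second loop over the counter's items sums the counts of the non-'Positivo' sentiments.
theorem pvB_others (xs : List String) :
    (PySem.Dict.counter xs).items.foldl (fun acc q => if q.1 = "Positivo" then acc else acc + q.2) (0 : Int)
      = (xs.length : Int) - (xs.count "Positivo" : Nat) := by
  have hfold : ∀ (l : List (String × Int)) (a : Int),
      l.foldl (fun acc q => if q.1 = "Positivo" then acc else acc + q.2) a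
        = a + ((l.filter (fun q => q.1 ≠ "Positivo")).map (·.2)).sum := by
    intro l; induction l with
    | nil => simp
    | cons x t ih =>
      intro a
      rw [List.foldl_cons, ih]
      by_cases h : x.1 = "Positivo" <;> simp [h, add_assoc]
  rw [hfold, PySem.Dict.items_counter]
  have hperm : (PySem.Set.ofList xs).Perm xs.dedup :=
    (List.perm_ext_iff_of_nodup (PySem.Set.nodup_ofList xs) xs.nodup_dedup).mpr
      (by intro x; simp [PySem.Set.mem_ofList, List.mem_dedup])
  have hperm2 := ((hperm.map (fun k => (k, (xs.count k : Int)))).filter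
      (fun q => decide (q.1 ≠ "Positivo"))).map (·.2)
  rw [hperm2.sum_eq, List.filter_map, List.map_map]
  have hmid : ((xs.dedup.filter ((fun q => decide (q.1 ≠ "Positivo")) ∘ (fun k => (k, (xs.count k : Int))))).map
      ((·.2) ∘ (fun k => (k, (xs.count k : Int))))).sum
      = (((xs.dedup.filter (fun k => decide (k ≠ "Positivo"))).map (fun k => xs.count k)).sum : Int) := by
    simp [Function.comp_def, Nat.cast_list_sum, List.map_map]
  rw [hmid, List.sum_map_count_dedup_filter_eq_countP]
  have hlen : xs.countP (fun x => decide (x = "Positivo")) + xs.countP (fun x => decide (x ≠ "Positivo")) = xs.length := by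
    rw [List.length_eq_countP_add_countP (fun x => decide (x = "Positivo"))]
    congr 1
    apply List.countP_congr
    intro x _
    simp
  have hc : xs.count "Positivo" = xs.countP (fun x => decide (x = "Positivo")) := by
    rw [List.count_eq_countP]
    apply List.countP_congr
    intro x _
    simp
  rw [zero_add, hc]
  omega

-- ===== VERDICT (by name: the statement is the Claim_ definition above) =====
theorem calc_sentimentos_spec : Claim_equal_calc_sentimentos := by
  intro comentarios _ _
  unfold Spec_calc_sentimentos calc_sentimentos calc_sentimentos_alt
  rw [pvA_foldl_inv, pvB_freq_eq_counter]
  simp [pvB_others]
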